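-- pv_equiv track=rewrite | github.com/vosslab/webwork-open-problem-PGML | pg_analyze/extract_evaluators.py | _scan_heredoc_terminator
-- ===== SOURCE A (Python) =====
-- def _scan_heredoc_terminator(line: str) -> str | None:
-- 	"""
-- 	Detect a heredoc introducer outside of strings and return its terminator token.
-- 	"""
-- 	in_sq = False
-- 	in_dq = False
-- 	escape = False
--
-- 	i = 0
-- 	while i < len(line) - 1:
-- 		ch = line[i]
-- 		if escape:
-- 			escape = False
-- 			i += 1
-- 			continue
-- 		if ch == "\\":
-- 			escape = True
-- 			i += 1
-- 			continue
-- 		if (not in_dq) and (ch == "'") and (not in_sq):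
-- 			in_sq = True
-- 			i += 1
-- 			continue
-- 		if in_sq and ch == "'":
-- 			in_sq = False
-- 			i += 1
-- 			continue
-- 		if (not in_sq) and (ch == '"') and (not in_dq):
-- 			in_dq = True
-- 			i += 1
-- 			continue
-- 		if in_dq and ch == '"':
-- 			in_dq = False
-- 			i += 1
-- 			continue
--
-- 		if (not in_sq) and (not in_dq) and (ch == "<") and (line[i + 1] == "<"):
-- 			j = i + 2
-- 			if j < len(line) and line[j] == "-":
-- 				j += 1
-- 			while j < len(line) and line[j].isspace():
-- 				j += 1
-- 			if j >= len(line):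
-- 				return None
--
-- 			if line[j] in ("'", '"'):
-- 				quote = line[j]
-- 				j += 1
-- 				start = j
-- 				while j < len(line) and line[j] != quote:
-- 					j += 1
-- 				if j >= len(line):
-- 					return None
-- 				return line[start:j]
--
-- 			start = j
-- 			if not (line[j].isalpha() or line[j] == "_"):
-- 				return None
-- 			j += 1
-- 			while j < len(line) and (line[j].isalnum() or line[j] == "_"):
-- 				j += 1
-- 			return line[start:j]
--
-- 		i += 1
--
-- 	return None
-- ===== SOURCE B (Python) =====
-- def _skip_quoted(line, p, quote, n):
-- 	"""Return the position just past the closing quote (or n if unterminated)."""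
-- 	while p < n:
-- 		c = line[p]
-- 		if c == "\\":
-- 			p += 2
-- 		elif c == quote:
-- 			return p + 1
-- 		else:
-- 			p += 1
-- 	return p
--
--
-- def _parse_terminator(line, j):
-- 	rest = line[j:]
-- 	if rest.startswith("-"):
-- 		rest = rest[1:]
-- 	rest = rest.lstrip()
-- 	if not rest:
-- 		return None
-- 	q = rest[0]
-- 	if q in ("'", '"'):
-- 		body, sep, _ = rest[1:].partition(q)
-- 		return body if sep else None
-- 	if not (q.isalpha() or q == "_"):
-- 		return None
-- 	k = 1
-- 	while k < len(rest) and (rest[k].isalnum() or rest[k] == "_"):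
-- 		k += 1
-- 	return rest[:k]
--
--
-- def _scan_heredoc_terminator(line: str) -> str | None:
-- 	"""
-- 	Detect a heredoc introducer outside of strings and return its terminator token.
-- 	"""
-- 	n = len(line)
-- 	p = 0
-- 	while p < n - 1:
-- 		ch = line[p]
-- 		if ch == "\\":
-- 			p += 2
-- 		elif ch == "'" or ch == '"':
-- 			p = _skip_quoted(line, p + 1, ch, n)
-- 		elif ch == "<" and line[p + 1] == "<":
-- 			return _parse_terminator(line, p + 2)
-- 		else:
-- 			p += 1
-- 	return None
-- ===== Notes on version B (the rewrite author's own statement) =====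
-- stated objective: simpler
-- what changed: Replaced A's per-character state machine with in_sq/in_dq/escape flags by a tokenizer that consumes whole units per step (an escape pair, an entire quoted run via a skip helper, or '<<'), and parses the terminator by slicing/lstrip/partition instead of index loops.
import Mathlib
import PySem

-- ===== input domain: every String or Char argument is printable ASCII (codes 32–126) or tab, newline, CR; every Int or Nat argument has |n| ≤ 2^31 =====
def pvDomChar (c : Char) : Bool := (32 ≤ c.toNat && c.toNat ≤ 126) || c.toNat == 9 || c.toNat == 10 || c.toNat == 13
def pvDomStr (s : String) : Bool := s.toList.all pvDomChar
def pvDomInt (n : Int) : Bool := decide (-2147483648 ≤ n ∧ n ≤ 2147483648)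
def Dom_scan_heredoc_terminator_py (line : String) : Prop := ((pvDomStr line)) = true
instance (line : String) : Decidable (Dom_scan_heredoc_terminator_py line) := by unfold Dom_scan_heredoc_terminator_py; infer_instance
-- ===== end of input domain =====

-- B replaces A's per-character quote/escape flag machine by a tokenizer that consumes
-- whole units (escape pair / quoted run / '<<') per step; objective: simpler, same cost.

-- ===== PORT A =====
-- A's inner while loops on j, transcribed on the suffix of the line after '<<'.

-- while j < len and line[j].isspace(): j += 1
def pvA_skipWs : List Char → List Char
  | [] => []
  | c :: t => if PySem.Chars.isspace c then pvA_skipWs t else c :: t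

-- while j < len and line[j] != quote: j += 1; if j >= len: None else line[start:j]
def pvA_scanQuote (q : Char) : List Char → Option (List Char)
  | [] => none
  | c :: t => if c == q then some [] else (pvA_scanQuote q t).map (c :: ·)

-- while j < len and (line[j].isalnum() or line[j] == '_'): j += 1
def pvA_identTail : List Char → List Char
  | [] => []
  | c :: t => if PySem.Chars.isalnum c || c == '_' then c :: pvA_identTail t else []

-- the body of A's '<<' branch, starting at j = i + 2 (t = suffix of line from j)
def pvA_parse (t : List Char) : Option (List Char) :=
  match pvA_skipWs (match t with | '-' :: r => r | _ => t) with
  | [] => none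
  | c :: r =>
    if c == '\'' || c == '"' then pvA_scanQuote c r
    else if PySem.Chars.isalpha c || c == '_' then some (c :: pvA_identTail r)
    else none

-- A's main loop: state (in_sq, in_dq, escape) over the suffix from i;
-- 'i < len(line) - 1' is 'the suffix has at least two characters'.
def pvA_loop (sq dq esc : Bool) : List Char → Option (List Char)
  | c :: c2 :: t =>
    if esc then pvA_loop sq dq false (c2 :: t)
    else if c == '\\' then pvA_loop sq dq true (c2 :: t)
    else if !dq && c == '\'' && !sq then pvA_loop true dq esc (c2 :: t)
    else if sq && c == '\'' then pvA_loop false dq esc (c2 :: t)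
    else if !sq && c == '"' && !dq then pvA_loop sq true esc (c2 :: t)
    else if dq && c == '"' then pvA_loop sq false esc (c2 :: t)
    else if !sq && !dq && c == '<' && c2 == '<' then pvA_parse t
    else pvA_loop sq dq esc (c2 :: t)
  | _ => none

def scan_heredoc_terminator_py (line : String) : Option String :=
  (pvA_loop false false false line.toList).map (fun cs => String.ofList cs)

-- ===== PORT B =====
-- _skip_quoted: return the suffix just past the closing quote (or [] if unterminated)
def pvB_skipQuoted (q : Char) : List Char → List Char
  | [] => []
  | c :: t =>
    if c == '\\' then (match t with | [] => [] | _ :: t' => pvB_skipQuoted q t')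
    else if c == q then t else pvB_skipQuoted q t

theorem pvB_skipQuoted_length_le_aux (q : Char) :
    ∀ (n : Nat) (t : List Char), t.length ≤ n → (pvB_skipQuoted q t).length ≤ t.length := by
  intro n
  induction n with
  | zero =>
    intro t ht
    have : t = [] := List.length_eq_zero_iff.mp (Nat.le_zero.mp ht)
    subst this; simp [pvB_skipQuoted]
  | succ n ih =>
    intro t ht
    match t with
    | [] => simp [pvB_skipQuoted]
    | c :: t' =>
      rw [pvB_skipQuoted.eq_def]
      by_cases h1 : c = '\\'
      · subst h1
        match t' with
        | [] => simp
        | d :: t'' =>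
          have h := ih t'' (by simp at ht; omega)
          simp only [show (('\\' : Char) == '\\') = true from rfl, if_true]
          simp only [List.length_cons]
          omega
      · have hb1 : (c == '\\') = false := by simp [h1]
        by_cases h2 : c = q
        · have hb2 : (c == q) = true := by simp [h2]
          simp [hb1, hb2]
        · have hb2 : (c == q) = false := by simp [h2]
          have h := ih t' (by simp at ht; omega)
          simp only [hb1, hb2, Bool.false_eq_true, if_false, List.length_cons]
          omega

theorem pvB_skipQuoted_length_le (q : Char) (t : List Char) :
    (pvB_skipQuoted q t).length ≤ t.length :=
  pvB_skipQuoted_length_le_aux q t.length t le_rfl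

-- _parse_terminator: slice from j, optional '-', lstrip, then quoted body (partition)
-- or identifier prefix
def pvB_parse (t : List Char) : Option (List Char) :=
  match PySem.Chars.lstrip (match t with | '-' :: r => r | _ => t) with
  | [] => none
  | c :: r =>
    if c == '\'' || c == '"' then
      -- rest[1:].partition(q): body before the first q, found iff q occurs
      if r.any (· == c) then some (r.takeWhile (· != c)) else none
    else if PySem.Chars.isalpha c || c == '_' then
      some (c :: r.takeWhile (fun d => PySem.Chars.isalnum d || d == '_'))
    else none

-- B's main loop: one token per step (escape pair, whole quoted run, '<<', plain char)
def pvB_loop : List Char → Option (List Char)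
  | c :: c2 :: t =>
    if c == '\\' then pvB_loop t
    else if c == '\'' || c == '"' then pvB_loop (pvB_skipQuoted c (c2 :: t))
    else if c == '<' && c2 == '<' then pvB_parse t
    else pvB_loop (c2 :: t)
  | _ => none
  termination_by t => t.length
  decreasing_by
  all_goals
    first
      | (have h := pvB_skipQuoted_length_le c (c2 :: t); simp at h ⊢; omega)
      | (simp; try omega)

def scan_heredoc_terminator_py_alt (line : String) : Option String :=
  (pvB_loop line.toList).map (fun cs => String.ofList cs)

-- ===== PRECONDITION & SPEC =====
def Spec_scan_heredoc_terminator_py (line : String) (out : Option String) : Prop := out = scan_heredoc_terminator_py_alt line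
instance (line : String) (out : Option String) : Decidable (Spec_scan_heredoc_terminator_py line out) := by unfold Spec_scan_heredoc_terminator_py; infer_instance

-- ===== CLAIM (what is proved, stated in full; the proofs are below) =====
def Claim_equal_scan_heredoc_terminator_py : Prop := ∀ (line : String), Dom_scan_heredoc_terminator_py line → Spec_scan_heredoc_terminator_py line (scan_heredoc_terminator_py line)

-- ===== LEMMAS AND PROOFS =====

theorem pvA_skipWs_eq (t : List Char) : pvA_skipWs t = PySem.Chars.lstrip t := by
  induction t with
  | nil => rfl
  | cons c t ih =>
    by_cases h : PySem.Chars.isspace c = true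
    · simpa [pvA_skipWs, PySem.Chars.lstrip, List.dropWhile, h] using ih
    · simp [pvA_skipWs, PySem.Chars.lstrip, List.dropWhile, h]

theorem pvA_scanQuote_eq (q : Char) (r : List Char) :
    pvA_scanQuote q r = (if r.any (· == q) then some (r.takeWhile (· != q)) else none) := by
  induction r with
  | nil => simp [pvA_scanQuote]
  | cons c r ih =>
    by_cases h : c = q
    · subst h; simp [pvA_scanQuote]
    · have hne : (c != q) = true := by simp [bne, h]
      have hbe : (c == q) = false := by simp [h]
      simp only [pvA_scanQuote, hbe, Bool.false_eq_true, if_false, ih, List.any_cons,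
        List.takeWhile_cons, hne]
      by_cases h2 : r.any (· == q) = true <;> simp [h2]

theorem pvA_identTail_eq (r : List Char) :
    pvA_identTail r = r.takeWhile (fun d => PySem.Chars.isalnum d || d == '_') := by
  induction r with
  | nil => rfl
  | cons c r ih =>
    by_cases h : (PySem.Chars.isalnum c || c == '_') = true <;>
      simp [pvA_identTail, h, ih]

theorem pv_parse_eq (t : List Char) : pvA_parse t = pvB_parse t := by
  unfold pvA_parse pvB_parse
  rw [pvA_skipWs_eq]
  cases h : PySem.Chars.lstrip (match t with | '-' :: r => r | _ => t) with
  | nil => rfl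
  | cons c r =>
    by_cases hq : (c == '\'' || c == '"') = true
    · simp [hq, pvA_scanQuote_eq]
    · simp [hq, pvA_identTail_eq]

-- The core correspondence: A's flag machine outside a string agrees with B's tokenizer,
-- and A's flag machine inside a q-quoted string agrees with B after skipping the run.
theorem pv_main : ∀ (n : Nat) (t : List Char), t.length ≤ n →
    (pvA_loop false false false t = pvB_loop t) ∧
    (∀ q : Char, q = '\'' ∨ q = '"' →
      pvA_loop (q == '\'') (q == '"') false t = pvB_loop (pvB_skipQuoted q t)) := by
  intro n
  induction n with
  | zero =>
    intro t ht
    have : t = [] := List.length_eq_zero_iff.mp (Nat.le_zero.mp ht)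
    subst this
    exact ⟨by simp [pvA_loop, pvB_loop], fun q _ => by simp [pvA_loop, pvB_loop, pvB_skipQuoted]⟩
  | succ n ih =>
    intro t ht
    match t with
    | [] =>
      exact ⟨by simp [pvA_loop, pvB_loop], fun q _ => by simp [pvA_loop, pvB_loop, pvB_skipQuoted]⟩
    | [c] =>
      refine ⟨by simp [pvA_loop, pvB_loop], fun q hq => ?_⟩
      have hA : pvA_loop (q == '\'') (q == '"') false [c] = none := by simp [pvA_loop]
      rw [hA]
      by_cases h1 : c = '\\'
      · subst h1; simp [pvB_skipQuoted, pvB_loop]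
      · by_cases h2 : c = q <;> simp [pvB_skipQuoted, beq_iff_eq, h1, h2, pvB_loop]
    | c :: c2 :: s =>
      have hlen : (c2 :: s).length ≤ n := by simp at ht ⊢; omega
      have hlen2 : s.length ≤ n := by simp at ht; omega
      constructor
      · -- outside any string
        by_cases hb : c = '\\'
        · subst hb
          have hA : pvA_loop false false false ('\\' :: c2 :: s)
              = pvA_loop false false true (c2 :: s) := by simp [pvA_loop]
          have hB : pvB_loop ('\\' :: c2 :: s) = pvB_loop s := by
            rw [pvB_loop]; simp
          rw [hA, hB]
          match s with
          | [] => simp [pvA_loop, pvB_loop]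
          | d :: s' =>
            have hA2 : pvA_loop false false true (c2 :: d :: s')
                = pvA_loop false false false (d :: s') := by simp [pvA_loop]
            rw [hA2]
            exact (ih (d :: s') hlen2).1
        · by_cases hq : c = '\'' ∨ c = '"'
          · have hA : pvA_loop false false false (c :: c2 :: s)
                = pvA_loop (c == '\'') (c == '"') false (c2 :: s) := by
              rcases hq with h | h <;> subst h <;> simp [pvA_loop]
            have hB : pvB_loop (c :: c2 :: s) = pvB_loop (pvB_skipQuoted c (c2 :: s)) := by
              have h2 : (c == '\'' || c == '"') = true := by
                rcases hq with h | h <;> subst h <;> rfl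
              have h1 : (c == '\\') = false := by simp [hb]
              rw [pvB_loop]; simp [h1, h2]
            rw [hA, hB]
            exact (ih (c2 :: s) hlen).2 c hq
          · rw [not_or] at hq
            by_cases hcl : c = '<'
            · by_cases hc2 : c2 = '<'
              · subst hcl; subst hc2
                have hA : pvA_loop false false false ('<' :: '<' :: s) = pvA_parse s := by
                  simp [pvA_loop]
                have hB : pvB_loop ('<' :: '<' :: s) = pvB_parse s := by
                  rw [pvB_loop]; simp
                rw [hA, hB]
                exact pv_parse_eq s
              · subst hcl
                have hA : pvA_loop false false false ('<' :: c2 :: s)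
                    = pvA_loop false false false (c2 :: s) := by
                  simp [pvA_loop, beq_iff_eq, hc2]
                have hB : pvB_loop ('<' :: c2 :: s) = pvB_loop (c2 :: s) := by
                  rw [pvB_loop]; simp [beq_iff_eq, hc2]
                rw [hA, hB]
                exact (ih (c2 :: s) hlen).1
            · have hA : pvA_loop false false false (c :: c2 :: s)
                  = pvA_loop false false false (c2 :: s) := by
                simp [pvA_loop, beq_iff_eq, hb, hq.1, hq.2, hcl]
              have hB : pvB_loop (c :: c2 :: s) = pvB_loop (c2 :: s) := by
                rw [pvB_loop]; simp [beq_iff_eq, hb, hq.1, hq.2, hcl]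
              rw [hA, hB]
              exact (ih (c2 :: s) hlen).1
      · -- inside a q-quoted string
        intro q hq
        by_cases hb : c = '\\'
        · subst hb
          have hA : pvA_loop (q == '\'') (q == '"') false ('\\' :: c2 :: s)
              = pvA_loop (q == '\'') (q == '"') true (c2 :: s) := by
            simp [pvA_loop]
          have hB : pvB_skipQuoted q ('\\' :: c2 :: s) = pvB_skipQuoted q s := by
            simp [pvB_skipQuoted]
          rw [hA, hB]
          match s with
          | [] => simp [pvA_loop, pvB_skipQuoted, pvB_loop]
          | d :: s' =>
            have hA2 : pvA_loop (q == '\'') (q == '"') true (c2 :: d :: s')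
                = pvA_loop (q == '\'') (q == '"') false (d :: s') := by
              simp [pvA_loop]
            rw [hA2]
            exact (ih (d :: s') hlen2).2 q hq
        · by_cases hc : c = q
          · subst hc
            have hA : pvA_loop (c == '\'') (c == '"') false (c :: c2 :: s)
                = pvA_loop false false false (c2 :: s) := by
              rcases hq with h | h <;> subst h <;> simp [pvA_loop]
            have hB : pvB_skipQuoted c (c :: c2 :: s) = c2 :: s := by
              simp [pvB_skipQuoted, beq_iff_eq, hb]
            rw [hA, hB]
            exact (ih (c2 :: s) hlen).1
          · have hA : pvA_loop (q == '\'') (q == '"') false (c :: c2 :: s)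
                = pvA_loop (q == '\'') (q == '"') false (c2 :: s) := by
              rcases hq with h | h <;> subst h <;>
                simp [pvA_loop, beq_iff_eq, hb, hc]
            have hB : pvB_skipQuoted q (c :: c2 :: s) = pvB_skipQuoted q (c2 :: s) := by
              simp [pvB_skipQuoted, beq_iff_eq, hb, hc]
            rw [hA, hB]
            exact (ih (c2 :: s) hlen).2 q hq

-- ===== VERDICT (by name: the statement is the Claim_ definition above) =====
theorem scan_heredoc_terminator_py_spec : Claim_equal_scan_heredoc_terminator_py := by
  intro line _
  unfold Spec_scan_heredoc_terminator_py scan_heredoc_terminator_py scan_heredoc_terminator_py_alt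
  rw [(pv_main line.toList.length line.toList le_rfl).1]
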